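-- pv_equiv track=rewrite | github.com/worksbyfriday/crossing | semantic_scan.py | _build_descendant_map
-- ===== SOURCE A (Python) =====
-- def _build_descendant_map(exception_parents: dict[str, str]) -> dict[str, set[str]]:
--     """Build a map from each exception type to all its descendants."""
--     descendants: dict[str, set[str]] = {}
--     for child, parent in exception_parents.items():
--         current = parent
--         visited: set[str] = set()
--         while current and current not in visited:
--             descendants.setdefault(current, set()).add(child)
--             visited.add(current)
--             current = exception_parents.get(current)
--     return descendants
-- ===== SOURCE B (Python) =====
-- def _ancestor_chain(parent, exception_parents):
--     chain = []
--     current = parent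
--     while current and current not in chain:
--         chain.append(current)
--         current = exception_parents.get(current)
--     return chain
--
--
-- def _build_descendant_map(exception_parents):
--     """Build a map from each exception type to all its descendants."""
--     chains = [(child, _ancestor_chain(parent, exception_parents))
--               for child, parent in exception_parents.items()]
--     keys = []
--     for _, chain in chains:
--         for node in chain:
--             if node not in keys:
--                 keys.append(node)
--     return {k: {c for c, ch in chains if k in ch} for k in keys}
-- ===== Notes on version B (the rewrite author's own statement) =====
-- stated objective: alternative
-- what changed: A builds the descendants dict incrementally with setdefault/add while walking each child's ancestor chain; B first materializes every child's ancestor chain, dedups the touched ancestors into a key list, and then builds each descendant set in one per-key comprehension over the chains.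
import Mathlib
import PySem

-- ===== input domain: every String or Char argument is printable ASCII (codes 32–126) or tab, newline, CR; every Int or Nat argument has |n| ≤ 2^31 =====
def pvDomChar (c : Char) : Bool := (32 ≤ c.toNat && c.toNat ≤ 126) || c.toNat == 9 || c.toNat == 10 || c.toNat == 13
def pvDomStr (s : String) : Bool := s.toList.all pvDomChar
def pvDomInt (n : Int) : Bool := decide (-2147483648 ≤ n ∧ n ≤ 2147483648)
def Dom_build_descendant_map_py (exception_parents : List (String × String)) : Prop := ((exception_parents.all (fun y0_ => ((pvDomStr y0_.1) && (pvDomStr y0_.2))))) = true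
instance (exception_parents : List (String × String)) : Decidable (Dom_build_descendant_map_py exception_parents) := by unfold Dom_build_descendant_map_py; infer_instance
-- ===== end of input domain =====

-- B replaces A's incremental setdefault-map build by a two-phase decomposition (materialize each child's
-- ancestor chain once, dedup the keys, then build each descendant set by a per-key comprehension); objective: alternative.


-- ===== PORT A =====
-- A's inner `while current and current not in visited` loop; `current` is an Option (None = dict.get miss),
-- truthiness of a string is `≠ ""`; `descendants.setdefault(current, set()).add(child)` is
-- `desc.modify current [] (PySem.Set.add · child)` (d[k] = f(d.get(k, set())), new key appended at the end).
-- The fuel is a totality guard only: `visited` gains a fresh element each iteration, all drawn from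
-- {parent} ∪ values(d), so `exception_parents.length + 2` iterations are never exhausted.
def pyLoopA (d : PySem.Dict String String) (child : String) :
    Nat → Option String → PySem.Set String → PySem.Dict String (PySem.Set String) →
    PySem.Dict String (PySem.Set String)
  | 0, _, _, desc => desc
  | fuel + 1, cur, visited, desc =>
    match cur with
    | none => desc
    | some c =>
      if c = "" then desc
      else if visited.contains c then desc
      else pyLoopA d child fuel (d.get? c) (PySem.Set.add visited c)
             (desc.modify c [] (fun s => PySem.Set.add s child))

def build_descendant_map_py (exception_parents : List (String × String)) : List (String × List String) :=
  let d : PySem.Dict String String := PySem.Dict.ofList exception_parents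
  let descendants : PySem.Dict String (PySem.Set String) :=
    d.items.foldl
      (fun desc p => pyLoopA d p.1 (exception_parents.length + 2) (some p.2) PySem.Set.empty desc)
      PySem.Dict.empty
  descendants.items

-- ===== PORT B =====
-- B's `_ancestor_chain`: same truthiness/fuel conventions as above, membership tested on the chain list itself.
def chainB (d : PySem.Dict String String) : Nat → Option String → List String → List String
  | 0, _, chain => chain
  | fuel + 1, cur, chain =>
    match cur with
    | none => chain
    | some c =>
      if c = "" then chain
      else if c ∈ chain then chain
      else chainB d fuel (d.get? c) (chain ++ [c])

def build_descendant_map_py_alt (exception_parents : List (String × String)) : List (String × List String) :=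
  let d : PySem.Dict String String := PySem.Dict.ofList exception_parents
  let chains : List (String × List String) :=
    d.items.map (fun p => (p.1, chainB d (exception_parents.length + 2) (some p.2) []))
  let keys : List String :=
    chains.foldl (fun ks q => q.2.foldl (fun ks n => if n ∈ ks then ks else ks ++ [n]) ks) []
  keys.map (fun k => (k, PySem.Set.ofList ((chains.filter (fun q => k ∈ q.2)).map (·.1))))

-- ===== PRECONDITION & SPEC =====
def Spec_build_descendant_map_py (exception_parents : List (String × String)) (out : List (String × List String)) : Prop := out = build_descendant_map_py_alt exception_parents
instance (exception_parents : List (String × String)) (out : List (String × List String)) : Decidable (Spec_build_descendant_map_py exception_parents out) := by unfold Spec_build_descendant_map_py; infer_instance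

-- ===== CLAIM (what is proved, stated in full; the proofs are below) =====
def Claim_equal_build_descendant_map_py : Prop := ∀ (exception_parents : List (String × String)), Dom_build_descendant_map_py exception_parents → Spec_build_descendant_map_py exception_parents (build_descendant_map_py exception_parents)

-- ===== LEMMAS AND PROOFS =====

-- chainB only appends to its accumulator.
theorem chainB_prefix (d : PySem.Dict String String) :
    ∀ (fuel : Nat) (cur : Option String) (chain : List String),
      chain <+: chainB d fuel cur chain := by
  intro fuel
  induction fuel with
  | zero => intro cur chain; simp [chainB]
  | succ n ih =>
    intro cur chain
    match cur with
    | none => simp [chainB]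
    | some c =>
      simp only [chainB]
      split_ifs with h1 h2
      · exact List.prefix_refl _
      · exact List.prefix_refl _
      · exact (List.prefix_append chain [c]).trans (ih (d.get? c) (chain ++ [c]))

-- A's inner walk performs exactly one setdefault-add per freshly discovered chain node.
theorem pyLoopA_eq_foldl_chain (d : PySem.Dict String String) (child : String) :
    ∀ (fuel : Nat) (cur : Option String) (visited : PySem.Set String)
      (desc : PySem.Dict String (PySem.Set String)),
      pyLoopA d child fuel cur visited desc =
        ((chainB d fuel cur visited).drop visited.length).foldl
          (fun de n => de.modify n [] (fun s => PySem.Set.add s child)) desc := by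
  intro fuel
  induction fuel with
  | zero => intro cur visited desc; simp [pyLoopA, chainB]
  | succ n ih =>
    intro cur visited desc
    match cur with
    | none => simp [pyLoopA, chainB]
    | some c =>
      simp only [pyLoopA, chainB]
      by_cases h1 : c = ""
      · simp [h1]
      · by_cases h2 : c ∈ visited
        · simp [h1, h2]
        · have hc : visited.contains c = false := by
            cases hcc : visited.contains c
            · rfl
            · exact absurd ((PySem.Set.contains_iff visited c).mp hcc) h2
          have hadd : PySem.Set.add visited c = visited ++ [c] := by
            simp [PySem.Set.add, h2]
          simp only [h1, hc, h2, if_false, Bool.false_eq_true]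
          rw [ih, hadd]
          obtain ⟨t, ht⟩ := chainB_prefix d n (d.get? c) (visited ++ [c])
          rw [← ht]
          have e1 : List.drop (visited ++ [c]).length (visited ++ [c] ++ t) = t :=
            List.drop_left' rfl
          have e2 : List.drop visited.length (visited ++ [c] ++ t) = c :: t := by
            have h3 : visited ++ [c] ++ t = visited ++ (c :: t) := by simp
            rw [h3]; exact List.drop_left' rfl
          rw [e1, e2]
          simp

-- effect of one chain's setdefault-add loop on one key's set
theorem getD_inner (c : String) (ch : List String) :
    ∀ (de : PySem.Dict String (PySem.Set String)) (k : String),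
      (ch.foldl (fun de n => de.modify n [] (fun s => PySem.Set.add s c)) de).getD k [] =
        if k ∈ ch then PySem.Set.add (de.getD k []) c else de.getD k [] := by
  induction ch with
  | nil => intro de k; simp
  | cons n t ih =>
    intro de k
    simp only [List.foldl_cons, ih]
    rw [PySem.Dict.getD_modify]
    by_cases h1 : k ∈ t <;> by_cases h2 : k = n <;>
      simp [h1, h2]

-- one key's set across all chains
theorem getD_outer (chains : List (String × List String)) :
    ∀ (de : PySem.Dict String (PySem.Set String)) (k : String),
      (chains.foldl
          (fun de q => q.2.foldl (fun de n => de.modify n [] (fun s => PySem.Set.add s q.1)) de)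
          de).getD k [] =
        chains.foldl (fun s q => if k ∈ q.2 then PySem.Set.add s q.1 else s) (de.getD k []) := by
  induction chains with
  | nil => intro de k; simp
  | cons q t ih =>
    intro de k
    simp only [List.foldl_cons, ih, getD_inner]

-- the key list across all chains
theorem keys_outer (chains : List (String × List String)) :
    ∀ (de : PySem.Dict String (PySem.Set String)),
      (chains.foldl
          (fun de q => q.2.foldl (fun de n => de.modify n [] (fun s => PySem.Set.add s q.1)) de)
          de).keys =
        chains.foldl (fun ks q => PySem.Set.update ks q.2) de.keys := by
  induction chains with
  | nil => intro de; simp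
  | cons q t ih =>
    intro de
    simp only [List.foldl_cons, ih,
      PySem.Dict.keys_foldl_modify q.2 [] (fun _ _ => fun s => PySem.Set.add s q.1) de]

theorem nodup_outer (chains : List (String × List String)) :
    ∀ (de : PySem.Dict String (PySem.Set String)), de.keys.Nodup →
      (chains.foldl
          (fun de q => q.2.foldl (fun de n => de.modify n [] (fun s => PySem.Set.add s q.1)) de)
          de).keys.Nodup := by
  induction chains with
  | nil => intro de h; simpa using h
  | cons q t ih =>
    intro de h
    simp only [List.foldl_cons]
    exact ih _ (PySem.Dict.nodup_keys_foldl_modify_key q.2 (fun n => n) []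
      (fun _ _ => fun s => PySem.Set.add s q.1) de h)

-- B's explicit membership-guarded append loop is Set.update
theorem keysB_inner (ch : List String) (ks : List String) :
    ch.foldl (fun ks n => if n ∈ ks then ks else ks ++ [n]) ks = PySem.Set.update ks ch := by
  have hf : (fun (ks : List String) n => if n ∈ ks then ks else ks ++ [n]) =
      (fun ks n => PySem.Set.add ks n) := by
    funext ks n
    by_cases h : n ∈ ks <;> simp [PySem.Set.add, PySem.Set.contains, h]
  rw [hf]
  rfl

theorem build_descendant_map_py_spec' :
    ∀ exception_parents, build_descendant_map_py exception_parents = build_descendant_map_py_alt exception_parents := by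
  intro ep
  simp only [build_descendant_map_py, build_descendant_map_py_alt]
  set d : PySem.Dict String String := PySem.Dict.ofList ep with hd
  set F : Nat := ep.length + 2 with hF
  set chains : List (String × List String) :=
    d.items.map (fun p => (p.1, chainB d F (some p.2) [])) with hch
  -- A's dict built incrementally = fold of the per-chain loops over `chains`
  have hA : d.items.foldl (fun desc p => pyLoopA d p.1 F (some p.2) PySem.Set.empty desc)
        PySem.Dict.empty =
      chains.foldl
        (fun de q => q.2.foldl (fun de n => de.modify n [] (fun s => PySem.Set.add s q.1)) de)
        PySem.Dict.empty := by
    rw [hch, List.foldl_map]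
    have hfun : ∀ (desc : PySem.Dict String (PySem.Set String)) (p : String × String),
        pyLoopA d p.1 F (some p.2) PySem.Set.empty desc =
          (chainB d F (some p.2) []).foldl
            (fun de n => de.modify n [] (fun s => PySem.Set.add s p.1)) desc := by
      intro desc p
      have := pyLoopA_eq_foldl_chain d p.1 F (some p.2) PySem.Set.empty desc
      simpa [PySem.Set.empty] using this
    simp only [hfun]
  rw [hA]
  set descA := chains.foldl
      (fun de q => q.2.foldl (fun de n => de.modify n [] (fun s => PySem.Set.add s q.1)) de)
      PySem.Dict.empty with hdescA
  -- items = keys paired with looked-up values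
  have hnodup : descA.keys.Nodup := nodup_outer chains _ PySem.Dict.nodup_keys_empty
  rw [PySem.Dict.items_eq_map_keys descA hnodup []]
  -- the two key lists agree
  have hkeys : descA.keys =
      chains.foldl (fun ks q => q.2.foldl (fun ks n => if n ∈ ks then ks else ks ++ [n]) ks) [] := by
    rw [hdescA, keys_outer]
    simp only [keysB_inner, PySem.Dict.keys_empty]
  -- the two values agree at every key
  have hval : (fun k => (k, descA.getD k [])) =
      (fun k => (k, PySem.Set.ofList ((chains.filter (fun q => k ∈ q.2)).map (·.1)))) := by
    funext k
    rw [hdescA, getD_outer, PySem.Dict.getD_empty]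
    have hfilt := PySem.List.foldl_ite_eq_foldl_filter
        (p := fun q : String × List String => k ∈ q.2)
        (f := fun (s : List String) (q : String × List String) => PySem.Set.add s q.1)
        (l := chains) (init := ([] : List String))
    rw [hfilt, PySem.Set.ofList_eq_foldl, List.foldl_map]
  rw [hkeys, hval]

-- ===== VERDICT (by name: the statement is the Claim_ definition above) =====
theorem build_descendant_map_py_spec : Claim_equal_build_descendant_map_py := by
  intro ep _
  unfold Spec_build_descendant_map_py
  exact build_descendant_map_py_spec' ep
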